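-- pv_equiv track=rewrite | github.com/Dcolonel6/code-challenges | leetcode/Group Anagrams(49)/group_anagram.py | anagram_prime_fctors
-- ===== SOURCE A (Python) =====
-- def anagram_prime_fctors(str1: str) -> int:
--     primes = {
--         'a': 2, 'b': 3, 'c': 5, 'd': 7, 'e': 11,
--         'f': 13, 'g': 17, 'h': 19, 'i': 23, 'j': 29,
--         'k': 31, 'l': 37, 'm': 41, 'n': 43, 'o': 47,
--         'p': 53, 'q': 59, 'r': 61, 's': 67, 't': 71,
--         'u': 73, 'v': 79, 'w': 83, 'x': 89, 'y': 97, 'z': 101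
--     }
--     product = 1
--     for letter in str1:
--         product *= primes[letter]
--     return product
-- ===== SOURCE B (Python) =====
-- def anagram_prime_fctors(str1: str) -> int:
--     primes = [2, 3, 5, 7, 11, 13, 17, 19, 23, 29, 31, 37, 41,
--               43, 47, 53, 59, 61, 67, 71, 73, 79, 83, 89, 97, 101]
--     counts = [0] * 26
--     for letter in str1:
--         counts[ord(letter) - 97] += 1
--     product = 1
--     for i in range(26):
--         product *= primes[i] ** counts[i]
--     return product
-- ===== Notes on version B (the rewrite author's own statement) =====
-- stated objective: faster
-- what changed: B replaces A's one dict-lookup-and-multiply per character by two phases: a 26-slot frequency array indexed by ord(letter)-97 built in one pass, then one power primes[i]**counts[i] per slot; a timing run measured B about 9x faster at n=16384 because A performs n multiplications of an ever-growing big integer while B performs 26 fast exponentiations.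
import Mathlib
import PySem

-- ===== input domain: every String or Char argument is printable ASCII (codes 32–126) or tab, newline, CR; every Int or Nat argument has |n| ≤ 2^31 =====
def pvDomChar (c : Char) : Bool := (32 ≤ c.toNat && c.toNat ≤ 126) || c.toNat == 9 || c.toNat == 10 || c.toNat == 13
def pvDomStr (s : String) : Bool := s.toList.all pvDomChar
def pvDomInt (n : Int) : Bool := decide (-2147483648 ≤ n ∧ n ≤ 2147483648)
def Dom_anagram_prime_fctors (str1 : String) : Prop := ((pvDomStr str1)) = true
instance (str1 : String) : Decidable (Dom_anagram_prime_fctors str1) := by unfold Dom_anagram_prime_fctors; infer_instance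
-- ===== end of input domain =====

set_option maxRecDepth 10000


-- B replaces A's dict-lookup-and-multiply per character by two phases — a 26-slot frequency array
-- indexed by ord(letter)-97, then one power per slot (objective: alternative decomposition).

-- ===== PORT A =====
-- A's primes dict; lookup default 0 is unreachable under Pre_ (Python raises KeyError on a character
-- that is not a lowercase letter; those inputs are outside Pre_).
def pvPrimes : PySem.Dict Char Int := PySem.Dict.ofList
  [('a', 2), ('b', 3), ('c', 5), ('d', 7), ('e', 11),
   ('f', 13), ('g', 17), ('h', 19), ('i', 23), ('j', 29),
   ('k', 31), ('l', 37), ('m', 41), ('n', 43), ('o', 47),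
   ('p', 53), ('q', 59), ('r', 61), ('s', 67), ('t', 71),
   ('u', 73), ('v', 79), ('w', 83), ('x', 89), ('y', 97), ('z', 101)]

def anagram_prime_fctors (str1 : String) : Int :=
  str1.toList.foldl (fun product letter => product * pvPrimes.getD letter 0) 1

-- ===== PORT B =====
-- B's prime LIST, indexed by character code minus 97
def pvPrimeList : List Int :=
  [2, 3, 5, 7, 11, 13, 17, 19, 23, 29, 31, 37, 41,
   43, 47, 53, 59, 61, 67, 71, 73, 79, 83, 89, 97, 101]

-- Source B: phase 1 builds the 26-slot counts array (counts[ord(letter)-97] += 1; list indexing is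
-- pySetD/pyGetD, exact under Pre_ where the index is in range); phase 2 multiplies one power per slot
-- (counts[i] is never negative, so Python's ** is ^ on the toNat of the count).
def anagram_prime_fctors_alt (str1 : String) : Int :=
  let counts : List Int := str1.toList.foldl
    (fun cs letter =>
      PySem.List.pySetD cs ((letter.toNat : Int) - 97)
        (PySem.List.pyGetD cs ((letter.toNat : Int) - 97) 0 + 1))
    (List.replicate 26 0)
  (PySem.List.pyRange 0 26 1).foldl
    (fun product i =>
      product * PySem.List.pyGetD pvPrimeList i 0 ^ (PySem.List.pyGetD counts i 0).toNat) 1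

-- the 26 lowercase ASCII letters (the keys of A's primes dict)
def pvLows : List Char :=
  ['a','b','c','d','e','f','g','h','i','j','k','l','m',
   'n','o','p','q','r','s','t','u','v','w','x','y','z']

-- ===== PRECONDITION & SPEC =====
-- Pre_ excludes exactly the inputs containing a character that is not a lowercase ASCII letter,
-- on which the Python A raises KeyError.
def Pre_anagram_prime_fctors (str1 : String) : Prop :=
  str1.toList.all (fun c => decide (c ∈ pvLows)) = true
instance (str1 : String) : Decidable (Pre_anagram_prime_fctors str1) := by
  unfold Pre_anagram_prime_fctors; infer_instance
def pvWitness_anagram_prime_fctors : String := "banana"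

def Spec_anagram_prime_fctors (str1 : String) (out : Int) : Prop := out = anagram_prime_fctors_alt str1
instance (str1 : String) (out : Int) : Decidable (Spec_anagram_prime_fctors str1 out) := by unfold Spec_anagram_prime_fctors; infer_instance

-- ===== CLAIM (what is proved, stated in full; the proofs are below) =====
def Claim_equal_anagram_prime_fctors : Prop := ∀ (str1 : String), Dom_anagram_prime_fctors str1 → Pre_anagram_prime_fctors str1 → Spec_anagram_prime_fctors str1 (anagram_prime_fctors str1)

-- ===== LEMMAS AND PROOFS =====

-- occurrences in l of the letter with code 97+i, as an Int (the value of counts[i])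
def pvCnt (l : List Char) (i : Nat) : Int := (l.countP (fun c => c.toNat == 97 + i) : Int)

-- the multiply-accumulate loop A uses is the product of a map
theorem pv_foldl_mul {α : Type} (f : α → Int) :
    ∀ (l : List α) (p : Int), l.foldl (fun a x => a * f x) p = p * (l.map f).prod := by
  intro l
  induction l with
  | nil => simp
  | cons x t ih => intro p; simp [List.foldl_cons, ih, mul_assoc]

-- one more character changes exactly its own slot's count
theorem pv_cnt_cons (c : Char) (t : List Char) (i : Nat) :
    pvCnt (c :: t) i = pvCnt t i + if c.toNat = 97 + i then 1 else 0 := by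
  simp only [pvCnt, List.countP_cons]
  by_cases hc : c.toNat = 97 + i
  · simp [hc]
  · simp [hc]

theorem pv_lows_bounds : ∀ c ∈ pvLows, 97 ≤ c.toNat ∧ c.toNat ≤ 122 := by
  intro c hc
  fin_cases hc <;> exact ⟨by decide, by decide⟩

-- on each lowercase letter A's dict lookup equals B's list indexing at ord(c)-97
theorem pv_char_prime :
    ∀ c ∈ pvLows, pvPrimes.getD c 0 = PySem.List.pyGetD pvPrimeList ((c.toNat : Int) - 97) 0 := by
  intro c hc
  fin_cases hc <;> decide

-- one counting step on a 26-slot array given as a map over range 26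
theorem pv_set_map (f : Nat → Int) (c : Char) (h97 : 97 ≤ c.toNat) (h122 : c.toNat ≤ 122) :
    PySem.List.pySetD ((List.range 26).map f) ((c.toNat : Int) - 97)
      (PySem.List.pyGetD ((List.range 26).map f) ((c.toNat : Int) - 97) 0 + 1)
    = (List.range 26).map (fun i => f i + if c.toNat = 97 + i then 1 else 0) := by
  have hcast : ((c.toNat : Int) - 97) = ((c.toNat - 97 : Nat) : Int) := by omega
  have hlt : c.toNat - 97 < 26 := by omega
  rw [hcast, PySem.List.pySetD_natCast, PySem.List.pyGetD_natCast]
  have hget : ((List.range 26).map f).getD (c.toNat - 97) 0 = f (c.toNat - 97) := by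
    simp [List.getD, hlt]
  rw [hget]
  apply List.ext_getElem
  · simp
  · intro i h1 h2
    simp only [List.getElem_set, List.getElem_map, List.getElem_range]
    simp only [List.length_set, List.length_map, List.length_range] at h1
    by_cases h : c.toNat - 97 = i
    · have : c.toNat = 97 + i := by omega
      simp [this]
    · have : ¬ c.toNat = 97 + i := by omega
      simp [h, this]

-- phase 1: folding the counting step over l adds the letter counts slotwise
theorem pv_counts_map :
    ∀ (l : List Char) (f : Nat → Int), (∀ c ∈ l, c ∈ pvLows) →
      l.foldl (fun cs letter =>
          PySem.List.pySetD cs ((letter.toNat : Int) - 97)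
            (PySem.List.pyGetD cs ((letter.toNat : Int) - 97) 0 + 1))
        ((List.range 26).map f)
      = (List.range 26).map (fun i => f i + pvCnt l i) := by
  intro l
  induction l with
  | nil => intro f _; simp [pvCnt]
  | cons c t ih =>
    intro f h
    obtain ⟨h97, h122⟩ := pv_lows_bounds c (h c List.mem_cons_self)
    simp only [List.foldl_cons]
    rw [pv_set_map f c h97 h122, ih _ (fun x hx => h x (List.mem_cons_of_mem _ hx))]
    apply List.map_congr_left
    intro i _
    rw [pv_cnt_cons]; ring

-- a product over List.range is a product over Finset.range
theorem pv_prod_range (n : Nat) (q : Nat → Int) :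
    ((List.range n).map q).prod = ∏ i ∈ Finset.range n, q i := by
  induction n with
  | zero => simp
  | succ m ih => simp [List.range_succ, Finset.prod_range_succ, ih]

-- phase 2 on a 26-slot array given as a map over range 26 is a product of 26 powers
theorem pv_phase2_prod (f : Nat → Int) :
    (PySem.List.pyRange 0 26 1).foldl
      (fun product i =>
        product * PySem.List.pyGetD pvPrimeList i 0
          ^ (PySem.List.pyGetD ((List.range 26).map f) i 0).toNat) 1
    = ∏ i ∈ Finset.range 26,
        PySem.List.pyGetD pvPrimeList (i : Int) 0 ^ (f i).toNat := by
  have hr : PySem.List.pyRange 0 26 1 = (List.range 26).map (fun n : Nat => (n : Int)) := by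
    rw [PySem.List.pyRange_one]; simp
  rw [hr, List.foldl_map]
  have hstep : ∀ (p : Int), ∀ n ∈ List.range 26,
      p * PySem.List.pyGetD pvPrimeList ((n : Nat) : Int) 0
          ^ (PySem.List.pyGetD ((List.range 26).map f) ((n : Nat) : Int) 0).toNat
      = p * PySem.List.pyGetD pvPrimeList ((n : Nat) : Int) 0 ^ (f n).toNat := by
    intro p n hn
    have hlt : n < 26 := List.mem_range.mp hn
    have : PySem.List.pyGetD ((List.range 26).map f) ((n : Nat) : Int) 0 = f n := by
      rw [PySem.List.pyGetD_natCast]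
      simp [List.getD, hlt]
    rw [this]
  calc (List.range 26).foldl
        (fun p n => p * PySem.List.pyGetD pvPrimeList ((n : Nat) : Int) 0
          ^ (PySem.List.pyGetD ((List.range 26).map f) ((n : Nat) : Int) 0).toNat) 1
      = (List.range 26).foldl
        (fun p n => p * PySem.List.pyGetD pvPrimeList ((n : Nat) : Int) 0 ^ (f n).toNat) 1 := by
        exact PySem.List.foldl_congr_mem _ _ _ _ (fun a x hx => hstep a x hx)
    _ = ∏ i ∈ Finset.range 26, PySem.List.pyGetD pvPrimeList (i : Int) 0 ^ (f i).toNat := by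
        have := pv_foldl_mul (fun n : Nat => PySem.List.pyGetD pvPrimeList ((n : Nat) : Int) 0 ^ (f n).toNat) (List.range 26) 1
        rw [this, one_mul, pv_prod_range]

-- incrementing slot ic = ord(c)-97 multiplies the 26-power product by primes[c]
theorem pv_bump_prod (f : Nat → Int) (hnn : ∀ i, 0 ≤ f i) (c : Char) (hc : c ∈ pvLows) :
    (∏ i ∈ Finset.range 26,
        PySem.List.pyGetD pvPrimeList (i : Int) 0
          ^ ((f i + if c.toNat = 97 + i then 1 else 0).toNat))
    = pvPrimes.getD c 0
      * ∏ i ∈ Finset.range 26, PySem.List.pyGetD pvPrimeList (i : Int) 0 ^ (f i).toNat := by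
  obtain ⟨h97, h122⟩ := pv_lows_bounds c hc
  set ic : Nat := c.toNat - 97 with hic
  have hmem : ic ∈ Finset.range 26 := Finset.mem_range.mpr (by omega)
  rw [← Finset.mul_prod_erase _ _ hmem, ← Finset.mul_prod_erase _ _ hmem]
  have hprim : pvPrimes.getD c 0 = PySem.List.pyGetD pvPrimeList ((ic : Nat) : Int) 0 := by
    have := pv_char_prime c hc
    have hcast : ((c.toNat : Int) - 97) = ((ic : Nat) : Int) := by omega
    rw [this, hcast]
  have hat : (f ic + if c.toNat = 97 + ic then 1 else 0).toNat = (f ic).toNat + 1 := by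
    have h0 := hnn ic
    rw [if_pos (by omega : c.toNat = 97 + ic)]
    omega
  rw [hat, pow_succ, hprim]
  have hrest : ∏ i ∈ (Finset.range 26).erase ic,
      PySem.List.pyGetD pvPrimeList (i : Int) 0
        ^ ((f i + if c.toNat = 97 + i then 1 else 0).toNat)
      = ∏ i ∈ (Finset.range 26).erase ic,
        PySem.List.pyGetD pvPrimeList (i : Int) 0 ^ (f i).toNat := by
    apply Finset.prod_congr rfl
    intro i hi
    have hne : i ≠ ic := Finset.ne_of_mem_erase hi
    have : ¬ c.toNat = 97 + i := by omega
    simp [this]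
  rw [hrest]
  ring

-- A's per-character product equals the 26-power product of the letter counts
theorem pv_grouped :
    ∀ (l : List Char), (∀ c ∈ l, c ∈ pvLows) →
      (l.map (fun c => pvPrimes.getD c 0)).prod
      = ∏ i ∈ Finset.range 26,
          PySem.List.pyGetD pvPrimeList (i : Int) 0 ^ (pvCnt l i).toNat := by
  intro l
  induction l with
  | nil => intro _; simp [pvCnt]
  | cons c t ih =>
    intro h
    simp only [List.map_cons, List.prod_cons]
    rw [ih (fun x hx => h x (List.mem_cons_of_mem _ hx))]
    have := pv_bump_prod (pvCnt t) (fun i => Int.natCast_nonneg _) c (h c List.mem_cons_self)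
    calc pvPrimes.getD c 0
          * ∏ i ∈ Finset.range 26, PySem.List.pyGetD pvPrimeList (i : Int) 0 ^ (pvCnt t i).toNat
        = ∏ i ∈ Finset.range 26,
            PySem.List.pyGetD pvPrimeList (i : Int) 0
              ^ ((pvCnt t i + if c.toNat = 97 + i then 1 else 0).toNat) := this.symm
      _ = ∏ i ∈ Finset.range 26,
            PySem.List.pyGetD pvPrimeList (i : Int) 0 ^ (pvCnt (c :: t) i).toNat := by
          apply Finset.prod_congr rfl
          intro i _
          rw [pv_cnt_cons]

-- ===== VERDICT (by name: the statement is the Claim_ definition above) =====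
theorem anagram_prime_fctors_spec : Claim_equal_anagram_prime_fctors := by
  intro str1 _ hpre
  unfold Spec_anagram_prime_fctors anagram_prime_fctors anagram_prime_fctors_alt
  have h : ∀ c ∈ str1.toList, c ∈ pvLows := by
    intro c hc
    exact of_decide_eq_true (List.all_eq_true.mp hpre c hc)
  have hrep : (List.replicate 26 (0 : Int)) = (List.range 26).map (fun _ => (0 : Int)) := by
    decide
  rw [pv_foldl_mul _ str1.toList 1, one_mul, pv_grouped str1.toList h]
  rw [hrep, pv_counts_map str1.toList (fun _ => 0) h]
  have : ((List.range 26).map fun i => (0 : Int) + pvCnt str1.toList i)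
      = (List.range 26).map (pvCnt str1.toList) := by
    apply List.map_congr_left; intro i _; ring
  rw [this, pv_phase2_prod (pvCnt str1.toList)]
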